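-- pv_equiv track=rewrite | github.com/ounsesa360/heuristica | CSPStowage.py | convert_position_matrix
-- ===== SOURCE A (Python) =====
-- def convert_position_matrix(position_matrix):
-- 	for i in range(len(position_matrix)-1, -1, -1):
-- 		for j in range(len(position_matrix[0])-1, -1, -1):
-- 			element = position_matrix[i][j]
-- 			if element == "X" and i == len(position_matrix)-1:
-- 				position_matrix[i][j] = "F"
-- 			elif element == "X" and position_matrix[i+1][j] == "F":
-- 				position_matrix[i][j] = "F"
-- 			elif element == "X" and position_matrix[i+1][j] != "F":
-- 				for k in range(i-1, -1, -1):
-- 					position_matrix[k][j] = "X"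
-- 	return position_matrix
-- ===== SOURCE B (Python) =====
-- def convert_position_matrix(position_matrix):
--     if not position_matrix:
--         return position_matrix
--     rows = len(position_matrix)
--     cols = len(position_matrix[0])
--     for j in range(cols):
--         supported = True
--         for i in range(rows - 1, -1, -1):
--             cell = position_matrix[i][j]
--             if cell == "X":
--                 if supported:
--                     position_matrix[i][j] = "F"
--                 else:
--                     for k in range(i):
--                         position_matrix[k][j] = "X"
--                     break
--             else:
--                 supported = (cell == "F")
--     return position_matrix
-- ===== Notes on version B (the rewrite author's own statement) =====
-- stated objective: alternative
-- what changed: Replaces A's row-major double loop, whose unsupported-X branch re-fills the whole column above at every higher row, by a single bottom-up pass per column carrying a 'supported' flag that fills the cells above once and breaks; on the random timing inputs this was not measurably faster.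
import Mathlib
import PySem

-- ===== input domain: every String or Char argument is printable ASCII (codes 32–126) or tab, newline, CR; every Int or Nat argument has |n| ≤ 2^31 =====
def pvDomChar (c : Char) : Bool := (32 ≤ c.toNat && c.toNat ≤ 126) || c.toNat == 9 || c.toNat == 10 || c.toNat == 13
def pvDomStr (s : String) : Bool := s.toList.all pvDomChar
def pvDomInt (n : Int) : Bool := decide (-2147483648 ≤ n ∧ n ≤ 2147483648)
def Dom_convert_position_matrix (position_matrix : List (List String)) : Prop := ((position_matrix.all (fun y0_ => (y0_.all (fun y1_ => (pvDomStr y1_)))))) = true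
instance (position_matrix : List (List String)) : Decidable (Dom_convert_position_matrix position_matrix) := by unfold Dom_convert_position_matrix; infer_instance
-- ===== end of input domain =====

-- B replaces A's repeated fill-everything-above-with-X inner loop (re-run at every higher row)
-- by one bottom-up pass per column with a 'supported' flag that fills above once and stops.
-- A mutates its argument in place; equivalence proved here is about the RETURN value (B performs
-- the same in-place mutation in Python, and the returned list is the mutated argument).

-- ===== PORT A =====
-- Python reads pm[i][j] / writes pm[i][j] = v; under Pre_ every access is in range, so
-- getD/set are exact here.
def pvGetCell (m : List (List String)) (i j : Nat) : String :=
  (m.getD i []).getD j ""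

def pvSetCell (m : List (List String)) (i j : Nat) (v : String) : List (List String) :=
  m.set i ((m.getD i []).set j v)

-- 'for k in range(i-1, -1, -1): pm[k][j] = "X"' — processes k = n-1, …, 0 (called with n = i)
def pvFillA (m : List (List String)) (n j : Nat) : List (List String) :=
  match n with
  | 0 => m
  | k+1 => pvFillA (pvSetCell m k j "X") k j

-- the body of A's inner loop at cell (i, j); Python's 'element' binding is inlined
def pvCellStepA (m : List (List String)) (i j : Nat) : List (List String) :=
  if pvGetCell m i j = "X" ∧ i = m.length - 1 then pvSetCell m i j "F"
  else if pvGetCell m i j = "X" ∧ pvGetCell m (i+1) j = "F" then pvSetCell m i j "F"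
  else if pvGetCell m i j = "X" ∧ pvGetCell m (i+1) j ≠ "F" then pvFillA m i j
  else m

-- 'for j in range(len(pm[0])-1, -1, -1)' — processes j = k-1, …, 0
def pvInnerA (m : List (List String)) (i : Nat) (k : Nat) : List (List String) :=
  match k with
  | 0 => m
  | j+1 => pvInnerA (pvCellStepA m i j) i j

-- 'for i in range(len(pm)-1, -1, -1)' — processes i = n-1, …, 0; the inner bound
-- len(pm[0]) is re-read from the current matrix each outer iteration, as in Python
def pvRowsA (m : List (List String)) (n : Nat) : List (List String) :=
  match n with
  | 0 => m
  | i+1 => pvRowsA (pvInnerA m i ((m.getD 0 []).length)) i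

def convert_position_matrix (position_matrix : List (List String)) : List (List String) :=
  pvRowsA position_matrix position_matrix.length

-- ===== PORT B =====
-- 'for k in range(i): pm[k][j] = "X"'
def pvFillB (m : List (List String)) (j : Nat) (i : Nat) : List (List String) :=
  (List.range i).foldl (fun acc k => pvSetCell acc k j "X") m

-- B's inner loop: 'for i in range(rows-1, -1, -1): …' with the supported flag and break
def pvColLoopB (m : List (List String)) (j : Nat) (n : Nat) (supported : Bool) : List (List String) :=
  match n with
  | 0 => m
  | i+1 =>
    -- Python's 'cell' binding is inlined
    if pvGetCell m i j = "X" then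
      if supported then pvColLoopB (pvSetCell m i j "F") j i true
      else pvFillB m j i                       -- break
    else pvColLoopB m j i (pvGetCell m i j == "F")

def convert_position_matrix_alt (position_matrix : List (List String)) : List (List String) :=
  if position_matrix.isEmpty then position_matrix
  else (List.range ((position_matrix.getD 0 []).length)).foldl
        (fun m j => pvColLoopB m j position_matrix.length true) position_matrix

-- ===== PRECONDITION & SPEC =====
-- Pre_ excludes exactly the ragged matrices on which Python A raises IndexError
-- (a row shorter than row 0, whose length sets the column range).
def Pre_convert_position_matrix (position_matrix : List (List String)) : Prop :=
  ∀ r ∈ position_matrix, (position_matrix.headD []).length ≤ r.length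

instance (position_matrix : List (List String)) : Decidable (Pre_convert_position_matrix position_matrix) := by
  unfold Pre_convert_position_matrix; infer_instance

def pvWitness_convert_position_matrix : List (List String) :=
  [["X", "X"], ["O", "X"]]

def Spec_convert_position_matrix (position_matrix : List (List String)) (out : List (List String)) : Prop := out = convert_position_matrix_alt position_matrix
instance (position_matrix : List (List String)) (out : List (List String)) : Decidable (Spec_convert_position_matrix position_matrix out) := by unfold Spec_convert_position_matrix; infer_instance

-- ===== CLAIM (what is proved, stated in full; the proofs are below) =====
def Claim_equal_convert_position_matrix : Prop := ∀ (position_matrix : List (List String)), Dom_convert_position_matrix position_matrix → Pre_convert_position_matrix position_matrix → Spec_convert_position_matrix position_matrix (convert_position_matrix position_matrix)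

-- ===== LEMMAS AND PROOFS =====

-- ---- single-column model of both programs ----
def pvFillCol (c : List String) (n : Nat) : List String :=
  match n with
  | 0 => c
  | k+1 => pvFillCol (c.set k "X") k

def pvStepCol (c : List String) (i : Nat) : List String :=
  if c.getD i "" = "X" ∧ i = c.length - 1 then c.set i "F"
  else if c.getD i "" = "X" ∧ c.getD (i+1) "" = "F" then c.set i "F"
  else if c.getD i "" = "X" ∧ c.getD (i+1) "" ≠ "F" then pvFillCol c i
  else c

def pvRunA (c : List String) (n : Nat) : List String :=
  match n with
  | 0 => c
  | i+1 => pvRunA (pvStepCol c i) i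

def pvFillColUp (c : List String) (i : Nat) : List String :=
  (List.range i).foldl (fun acc k => acc.set k "X") c

def pvColB (c : List String) (n : Nat) (sup : Bool) : List String :=
  match n with
  | 0 => c
  | i+1 =>
    if c.getD i "" = "X" then
      (if sup then pvColB (c.set i "F") i true else pvFillColUp c i)
    else pvColB c i (c.getD i "" == "F")

def pvColOf (m : List (List String)) (j : Nat) : List String :=
  m.map (fun r => r.getD j "")

def pvShape (m : List (List String)) : List Nat := m.map List.length

-- rectangularity carried through the proofs: every row reaches column C
def pvRect (m : List (List String)) (C : Nat) : Prop :=
  ∀ k, k < m.length → C ≤ (m.getD k []).length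

-- ---- generic getD/set facts ----
theorem pv_getD_set {α : Type} (c : List α) (d : α) (i k : Nat) (v : α) :
    (c.set i v).getD k d = if i = k ∧ i < c.length then v else c.getD k d := by
  simp only [List.getD_eq_getElem?_getD, List.getElem?_set]
  by_cases h1 : i = k
  · subst h1
    by_cases h2 : i < c.length
    · simp [h2]
    · simp [h2]
  · simp [h1]

theorem pv_getD_ext {c d : List String} (hl : c.length = d.length)
    (h : ∀ k, c.getD k "" = d.getD k "") : c = d := by
  apply List.ext_getElem hl
  intro k h1 h2
  have := h k
  rwa [List.getD_eq_getElem _ _ h1, List.getD_eq_getElem _ _ h2] at this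

theorem pv_getCell_colOf (m : List (List String)) (i j : Nat) :
    pvGetCell m i j = (pvColOf m j).getD i "" := by
  unfold pvGetCell pvColOf
  simp only [List.getD_eq_getElem?_getD, List.getElem?_map]
  cases h : m[i]? <;> simp_all

theorem pv_length_colOf (m : List (List String)) (j : Nat) :
    (pvColOf m j).length = m.length := by simp [pvColOf]

theorem pv_length_of_shape {a b : List (List String)} (h : pvShape a = pvShape b) :
    a.length = b.length := by
  have := congrArg List.length h
  simpa [pvShape] using this

theorem pv_rowlen_of_shape {a b : List (List String)} (h : pvShape a = pvShape b) (k : Nat) :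
    (a.getD k []).length = (b.getD k []).length := by
  have hl := pv_length_of_shape h
  by_cases hk : k < a.length
  · have h1 : (pvShape a).getD k 0 = (pvShape b).getD k 0 := by rw [h]
    simpa [pvShape, List.getD_eq_getElem?_getD, List.getElem?_map,
      List.getElem?_eq_getElem hk, List.getElem?_eq_getElem (hl ▸ hk)] using h1
  · rw [List.getD_eq_default _ _ (by omega), List.getD_eq_default _ _ (by omega)]

theorem pv_rect_of_shape {a b : List (List String)} {C : Nat} (h : pvShape a = pvShape b)
    (hr : pvRect b C) : pvRect a C := by
  intro k hk
  rw [pv_rowlen_of_shape h k]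
  exact hr k (by rw [← pv_length_of_shape h]; exact hk)

theorem pv_mat_ext {m m' : List (List String)} (h : pvShape m = pvShape m')
    (hc : ∀ j, pvColOf m j = pvColOf m' j) : m = m' := by
  have hl := pv_length_of_shape h
  apply List.ext_getElem hl
  intro i h1 h2
  apply List.ext_getElem
  · have := pv_rowlen_of_shape h i
    rwa [List.getD_eq_getElem _ _ h1, List.getD_eq_getElem _ _ h2] at this
  · intro k hk1 hk2
    have := congrArg (fun c => c.getD i "") (hc k)
    simp only [pvColOf, List.getD_eq_getElem?_getD, List.getElem?_map,
      List.getElem?_eq_getElem h1, List.getElem?_eq_getElem h2, Option.map_some,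
      Option.getD_some] at this
    rwa [List.getElem?_eq_getElem hk1, List.getElem?_eq_getElem hk2,
      Option.getD_some, Option.getD_some] at this

-- ---- setCell ----
theorem pv_shape_setCell (m : List (List String)) (i j : Nat) (v : String) :
    pvShape (pvSetCell m i j v) = pvShape m := by
  unfold pvShape pvSetCell
  rw [List.map_set]
  apply List.ext_getElem (by simp)
  intro k h1 h2
  rw [List.getElem_set]
  by_cases hik : i = k
  · subst hik
    have hi : i < m.length := by simpa using h2
    simp [hi]
  · simp [hik]

theorem pv_length_setCell (m : List (List String)) (i j : Nat) (v : String) :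
    (pvSetCell m i j v).length = m.length := by simp [pvSetCell]

theorem pv_getCell_setCell (m : List (List String)) (i j i' j' : Nat) (v : String) :
    pvGetCell (pvSetCell m i j v) i' j' =
      if i' = i ∧ j' = j ∧ i < m.length ∧ j < (m.getD i []).length then v
      else pvGetCell m i' j' := by
  unfold pvGetCell pvSetCell
  rw [pv_getD_set]
  by_cases hii : i = i' ∧ i < m.length
  · obtain ⟨h1, h2⟩ := hii; subst h1
    rw [if_pos ⟨rfl, h2⟩, pv_getD_set]
    by_cases hjj : j = j' ∧ j < (m.getD i []).length
    · obtain ⟨e, hl⟩ := hjj; subst e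
      rw [if_pos ⟨rfl, hl⟩, if_pos ⟨rfl, rfl, h2, hl⟩]
    · rw [if_neg hjj, if_neg (by rintro ⟨-, hj, -, hl⟩; exact hjj ⟨hj.symm, hl⟩)]
  · rw [if_neg hii, if_neg (by rintro ⟨h1, -, h3, -⟩; exact hii ⟨h1.symm, h3⟩)]

theorem pv_colOf_setCell_ne (m : List (List String)) (i j j' : Nat) (v : String) (h : j' ≠ j) :
    pvColOf (pvSetCell m i j v) j' = pvColOf m j' := by
  apply pv_getD_ext (by simp [pv_length_colOf, pv_length_setCell])
  intro k
  rw [← pv_getCell_colOf, ← pv_getCell_colOf, pv_getCell_setCell]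
  simp [h]

theorem pv_colOf_setCell_self (m : List (List String)) (i j : Nat) (v : String)
    (hrow : i < m.length → j < (m.getD i []).length) :
    pvColOf (pvSetCell m i j v) j = (pvColOf m j).set i v := by
  apply pv_getD_ext (by simp [pv_length_colOf, pv_length_setCell])
  intro k
  rw [← pv_getCell_colOf, pv_getCell_setCell, pv_getD_set, ← pv_getCell_colOf,
    pv_length_colOf]
  by_cases hk : k = i ∧ i < m.length
  · obtain ⟨e, h2⟩ := hk; subst e
    rw [if_pos ⟨rfl, rfl, h2, hrow h2⟩, if_pos ⟨rfl, h2⟩]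
  · rw [if_neg (by rintro ⟨e, -, h3, -⟩; exact hk ⟨e, h3⟩),
      if_neg (by rintro ⟨e, h3⟩; exact hk ⟨e.symm, h3⟩)]

-- ---- fill (A side, descending) ----
theorem pv_shape_fillA (n : Nat) : ∀ (m : List (List String)) (j : Nat),
    pvShape (pvFillA m n j) = pvShape m := by
  induction n with
  | zero => intro m j; rfl
  | succ k ih => intro m j; rw [pvFillA, ih, pv_shape_setCell]

theorem pv_colOf_fillA_ne (n : Nat) : ∀ (m : List (List String)) (j j' : Nat), j' ≠ j →
    pvColOf (pvFillA m n j) j' = pvColOf m j' := by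
  induction n with
  | zero => intro m j j' _; rfl
  | succ k ih => intro m j j' h; rw [pvFillA, ih _ _ _ h, pv_colOf_setCell_ne _ _ _ _ _ h]

theorem pv_colOf_fillA_self (n : Nat) : ∀ (m : List (List String)) (j C : Nat), j < C →
    pvRect m C → pvColOf (pvFillA m n j) j = pvFillCol (pvColOf m j) n := by
  induction n with
  | zero => intro m j C _ _; rfl
  | succ k ih =>
    intro m j C hj hr
    rw [pvFillA, pvFillCol, ih _ _ C hj (pv_rect_of_shape (pv_shape_setCell m k j "X") hr),
      pv_colOf_setCell_self]
    intro hk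
    exact lt_of_lt_of_le hj (hr k hk)

-- ---- cellStep (A side) ----
theorem pv_shape_cellStep (m : List (List String)) (i j : Nat) :
    pvShape (pvCellStepA m i j) = pvShape m := by
  unfold pvCellStepA
  split_ifs <;> first | rw [pv_shape_setCell] | rw [pv_shape_fillA] | rfl

theorem pv_colOf_cellStep_ne (m : List (List String)) (i j j' : Nat) (h : j' ≠ j) :
    pvColOf (pvCellStepA m i j) j' = pvColOf m j' := by
  unfold pvCellStepA
  split_ifs <;> first
    | rw [pv_colOf_setCell_ne _ _ _ _ _ h] | rw [pv_colOf_fillA_ne _ _ _ _ h] | rfl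

theorem pv_colOf_cellStep_self (m : List (List String)) (i j C : Nat) (hj : j < C)
    (hr : pvRect m C) :
    pvColOf (pvCellStepA m i j) j = pvStepCol (pvColOf m j) i := by
  have hrow : ∀ i', i' < m.length → j < (m.getD i' []).length :=
    fun i' hi' => lt_of_lt_of_le hj (hr i' hi')
  have e1 : pvGetCell m i j = (pvColOf m j).getD i "" := pv_getCell_colOf m i j
  have e2 : pvGetCell m (i+1) j = (pvColOf m j).getD (i+1) "" := pv_getCell_colOf m (i+1) j
  have e3 : m.length = (pvColOf m j).length := (pv_length_colOf m j).symm
  unfold pvCellStepA pvStepCol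
  simp only [← e1, ← e2, ← e3]
  split_ifs
  · exact pv_colOf_setCell_self m i j "F" (hrow i)
  · exact pv_colOf_setCell_self m i j "F" (hrow i)
  · exact pv_colOf_fillA_self i m j C hj hr
  · rfl

-- ---- inner loop over columns (A side) ----
theorem pv_shape_innerA (k : Nat) : ∀ (m : List (List String)) (i : Nat),
    pvShape (pvInnerA m i k) = pvShape m := by
  induction k with
  | zero => intro m i; rfl
  | succ j ih => intro m i; rw [pvInnerA, ih, pv_shape_cellStep]

theorem pv_colOf_innerA (k : Nat) : ∀ (m : List (List String)) (i C : Nat), k ≤ C →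
    pvRect m C → ∀ j',
    pvColOf (pvInnerA m i k) j' = if j' < k then pvStepCol (pvColOf m j') i else pvColOf m j' := by
  induction k with
  | zero => intro m i C _ _ j'; simp [pvInnerA]
  | succ k ih =>
    intro m i C hk hr j'
    rw [pvInnerA, ih _ _ C (by omega) (pv_rect_of_shape (pv_shape_cellStep m i k) hr)]
    by_cases hj : j' < k
    · rw [if_pos hj, if_pos (by omega), pv_colOf_cellStep_ne _ _ _ _ (by omega)]
    · rw [if_neg hj]
      by_cases hje : j' = k
      · subst hje
        rw [if_pos (by omega), pv_colOf_cellStep_self m i j' C (by omega) hr]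
      · rw [if_neg (by omega), pv_colOf_cellStep_ne _ _ _ _ (by omega)]

-- ---- outer loop over rows (A side) ----
theorem pv_rowsA_char (n : Nat) : ∀ (m : List (List String)) (C : Nat),
    (m.getD 0 []).length = C → pvRect m C →
    pvShape (pvRowsA m n) = pvShape m ∧
    ∀ j', pvColOf (pvRowsA m n) j' =
      if j' < C then pvRunA (pvColOf m j') n else pvColOf m j' := by
  induction n with
  | zero => intro m C _ _; exact ⟨rfl, fun j' => by simp [pvRowsA, pvRunA]⟩
  | succ i ih =>
    intro m C hC hr
    rw [pvRowsA, hC]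
    have hsh := pv_shape_innerA C m i
    have hr' := pv_rect_of_shape hsh hr
    have hC' : ((pvInnerA m i C).getD 0 []).length = C := by
      rw [pv_rowlen_of_shape hsh 0]; exact hC
    obtain ⟨ih1, ih2⟩ := ih (pvInnerA m i C) C hC' hr'
    refine ⟨ih1.trans hsh, fun j' => ?_⟩
    rw [ih2 j', pv_colOf_innerA C m i C le_rfl hr j']
    by_cases hj : j' < C
    · rw [if_pos hj, if_pos hj, if_pos hj, pvRunA]
    · rw [if_neg hj, if_neg hj, if_neg hj]

-- ---- fill (B side, ascending) and its agreement with the descending fill ----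
theorem pv_fillColUp_succ (c : List String) (i : Nat) :
    pvFillColUp c (i+1) = (pvFillColUp c i).set i "X" := by
  unfold pvFillColUp
  rw [List.range_succ, List.foldl_append]
  rfl

theorem pv_length_fillColUp (i : Nat) : ∀ (c : List String),
    (pvFillColUp c i).length = c.length := by
  induction i with
  | zero => intro c; rfl
  | succ k ih => intro c; rw [pv_fillColUp_succ, List.length_set, ih]

theorem pv_length_fillCol (n : Nat) : ∀ (c : List String),
    (pvFillCol c n).length = c.length := by
  induction n with
  | zero => intro c; rfl
  | succ k ih => intro c; rw [pvFillCol, ih, List.length_set]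

theorem pv_fillCol_getD (n : Nat) : ∀ (c : List String) (k : Nat),
    (pvFillCol c n).getD k "" = if k < n ∧ k < c.length then "X" else c.getD k "" := by
  induction n with
  | zero => intro c k; simp [pvFillCol]
  | succ i ih =>
    intro c k
    rw [pvFillCol, ih, pv_getD_set, List.length_set]
    by_cases h1 : k < i ∧ k < c.length
    · rw [if_pos h1, if_pos ⟨by omega, h1.2⟩]
    · rw [if_neg h1]
      by_cases h2 : i = k ∧ i < c.length
      · rw [if_pos h2, if_pos ⟨by omega, by omega⟩]
      · rw [if_neg h2, if_neg (by omega)]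

theorem pv_fillColUp_getD (i : Nat) : ∀ (c : List String) (k : Nat),
    (pvFillColUp c i).getD k "" = if k < i ∧ k < c.length then "X" else c.getD k "" := by
  induction i with
  | zero => intro c k; simp [pvFillColUp]
  | succ n ih =>
    intro c k
    rw [pv_fillColUp_succ, pv_getD_set, pv_length_fillColUp, ih]
    by_cases h2 : n = k ∧ n < c.length
    · rw [if_pos h2, if_pos ⟨by omega, by omega⟩]
    · rw [if_neg h2]
      by_cases h1 : k < n ∧ k < c.length
      · rw [if_pos h1, if_pos ⟨by omega, h1.2⟩]
      · rw [if_neg h1, if_neg (by omega)]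

theorem pv_fillColUp_eq_fillCol (c : List String) (n : Nat) :
    pvFillColUp c n = pvFillCol c n := by
  apply pv_getD_ext (by rw [pv_length_fillColUp, pv_length_fillCol])
  intro k
  rw [pv_fillColUp_getD, pv_fillCol_getD]

theorem pv_shape_fillB (i : Nat) : ∀ (m : List (List String)) (j : Nat),
    pvShape (pvFillB m j i) = pvShape m := by
  induction i with
  | zero => intro m j; rfl
  | succ k ih =>
    intro m j
    have : pvFillB m j (k+1) = pvSetCell (pvFillB m j k) k j "X" := by
      unfold pvFillB; rw [List.range_succ, List.foldl_append]; rfl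
    rw [this, pv_shape_setCell, ih]

theorem pv_colOf_fillB_ne (i : Nat) : ∀ (m : List (List String)) (j j' : Nat), j' ≠ j →
    pvColOf (pvFillB m j i) j' = pvColOf m j' := by
  induction i with
  | zero => intro m j j' _; rfl
  | succ k ih =>
    intro m j j' h
    have : pvFillB m j (k+1) = pvSetCell (pvFillB m j k) k j "X" := by
      unfold pvFillB; rw [List.range_succ, List.foldl_append]; rfl
    rw [this, pv_colOf_setCell_ne _ _ _ _ _ h, ih _ _ _ h]

theorem pv_colOf_fillB_self (i : Nat) : ∀ (m : List (List String)) (j C : Nat), j < C →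
    pvRect m C → pvColOf (pvFillB m j i) j = pvFillColUp (pvColOf m j) i := by
  induction i with
  | zero => intro m j C _ _; rfl
  | succ k ih =>
    intro m j C hj hr
    have hstep : pvFillB m j (k+1) = pvSetCell (pvFillB m j k) k j "X" := by
      unfold pvFillB; rw [List.range_succ, List.foldl_append]; rfl
    rw [hstep, pv_fillColUp_succ, ← ih _ _ C hj hr, pv_colOf_setCell_self]
    intro hk
    have hr' := pv_rect_of_shape (pv_shape_fillB k m j) hr
    exact lt_of_lt_of_le hj (hr' k hk)

-- ---- B's per-column loop at matrix level vs column level ----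
theorem pv_colLoopB_char (n : Nat) : ∀ (m : List (List String)) (j C : Nat) (sup : Bool),
    j < C → pvRect m C →
    pvShape (pvColLoopB m j n sup) = pvShape m ∧
    pvColOf (pvColLoopB m j n sup) j = pvColB (pvColOf m j) n sup ∧
    ∀ j', j' ≠ j → pvColOf (pvColLoopB m j n sup) j' = pvColOf m j' := by
  induction n with
  | zero => intro m j C sup _ _; exact ⟨rfl, rfl, fun _ _ => rfl⟩
  | succ i ih =>
    intro m j C sup hj hr
    rw [pvColLoopB, pvColB]
    simp only [pv_getCell_colOf m i j]
    have hrow : ∀ i', i' < m.length → j < (m.getD i' []).length :=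
      fun i' hi' => lt_of_lt_of_le hj (hr i' hi')
    by_cases hx : (pvColOf m j).getD i "" = "X"
    · rw [if_pos hx, if_pos hx]
      cases sup with
      | true =>
        simp only [if_true]
        have hsh := pv_shape_setCell m i j "F"
        obtain ⟨c1, c2, c3⟩ := ih (pvSetCell m i j "F") j C true hj (pv_rect_of_shape hsh hr)
        refine ⟨c1.trans hsh, ?_, fun j' hj' => (c3 j' hj').trans (pv_colOf_setCell_ne _ _ _ _ _ hj')⟩
        rw [c2, pv_colOf_setCell_self m i j "F" (hrow i)]
      | false =>
        simp only [Bool.false_eq_true, if_false]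
        exact ⟨pv_shape_fillB i m j, pv_colOf_fillB_self i m j C hj hr,
          fun j' hj' => pv_colOf_fillB_ne i m j j' hj'⟩
    · rw [if_neg hx, if_neg hx]
      exact ih m j C _ hj hr

-- ---- B's outer fold over columns ----
theorem pv_altFold_char (k : Nat) : ∀ (m : List (List String)) (C R : Nat), k ≤ C →
    pvRect m C → m.length = R →
    pvShape ((List.range k).foldl (fun m' j => pvColLoopB m' j R true) m) = pvShape m ∧
    ∀ j', pvColOf ((List.range k).foldl (fun m' j => pvColLoopB m' j R true) m) j' =
      if j' < k then pvColB (pvColOf m j') R true else pvColOf m j' := by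
  induction k with
  | zero => intro m C R _ _ _; exact ⟨rfl, fun j' => by simp⟩
  | succ k ih =>
    intro m C R hk hr hR
    rw [List.range_succ, List.foldl_append]
    obtain ⟨ih1, ih2⟩ := ih m C R (by omega) hr hR
    have hr' : pvRect ((List.range k).foldl (fun m' j => pvColLoopB m' j R true) m) C :=
      pv_rect_of_shape ih1 hr
    obtain ⟨c1, c2, c3⟩ := pv_colLoopB_char R _ k C true (by omega) hr'
    simp only [List.foldl_cons, List.foldl_nil]
    refine ⟨c1.trans ih1, fun j' => ?_⟩
    by_cases hj : j' < k
    · rw [c3 j' (by omega), ih2 j', if_pos hj, if_pos (by omega)]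
    · by_cases hje : j' = k
      · subst hje
        rw [c2, ih2 j', if_neg hj, if_pos (by omega)]
      · rw [c3 j' (by omega), ih2 j', if_neg hj, if_neg (by omega)]

-- ---- column-level equivalence of the two algorithms ----
theorem pv_fillCol_id (n : Nat) : ∀ (c : List String),
    (∀ k, k < n → c.getD k "" = "X") → pvFillCol c n = c := by
  intro c h
  apply pv_getD_ext (pv_length_fillCol n c)
  intro k
  rw [pv_fillCol_getD]
  by_cases hk : k < n ∧ k < c.length
  · rw [if_pos hk, h k hk.1]
  · rw [if_neg hk]

theorem pv_runA_fixed (n : Nat) : ∀ (c : List String), n < c.length →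
    (∀ k, k < n → c.getD k "" = "X") → c.getD n "" ≠ "F" → pvRunA c n = c := by
  induction n with
  | zero => intro c _ _ _; rfl
  | succ i ih =>
    intro c hlt hX hF
    have hXi : c.getD i "" = "X" := hX i (by omega)
    have hstep : pvStepCol c i = c := by
      unfold pvStepCol
      rw [if_neg (by rintro ⟨_, h2⟩; omega), if_neg (by rintro ⟨_, h2⟩; exact hF h2),
        if_pos ⟨hXi, hF⟩]
      exact pv_fillCol_id i c (fun k hk => hX k (by omega))
    rw [pvRunA, hstep]
    exact ih c (by omega) (fun k hk => hX k (by omega)) (by rw [hXi]; decide)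

theorem pv_col_main (n : Nat) : ∀ (c : List String), n ≤ c.length →
    pvRunA c n = pvColB c n ((n == c.length) || (c.getD n "" == "F")) := by
  induction n with
  | zero => intro c _; rfl
  | succ i ih =>
    intro c hn
    rw [pvRunA, pvColB]
    by_cases hx : c.getD i "" = "X"
    · rw [if_pos hx]
      by_cases hsup : i + 1 = c.length ∨ c.getD (i+1) "" = "F"
      · have hflag : ((i+1 == c.length) || (c.getD (i+1) "" == "F")) = true := by
          rw [Bool.or_eq_true, beq_iff_eq, beq_iff_eq]
          exact hsup
        rw [hflag, if_pos rfl]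
        have hstep : pvStepCol c i = c.set i "F" := by
          unfold pvStepCol
          rcases hsup with h | h
          · rw [if_pos ⟨hx, by omega⟩]
          · by_cases h1 : i = c.length - 1
            · rw [if_pos ⟨hx, h1⟩]
            · rw [if_neg (by rintro ⟨_, h2⟩; exact h1 h2), if_pos ⟨hx, h⟩]
        rw [hstep]
        have := ih (c.set i "F") (by rw [List.length_set]; omega)
        rw [this]
        congr 1
        have hilen : i < c.length := by omega
        rw [List.length_set, pv_getD_set, if_pos ⟨rfl, hilen⟩]
        simp
      · rw [not_or] at hsup
        obtain ⟨h1, h2⟩ := hsup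
        have hflag : ((i+1 == c.length) || (c.getD (i+1) "" == "F")) = false := by
          rw [Bool.or_eq_false_iff, beq_eq_false_iff_ne, beq_eq_false_iff_ne]
          exact ⟨fun h => h1 h, h2⟩
        rw [hflag]
        simp only [Bool.false_eq_true, if_false]
        have hstep : pvStepCol c i = pvFillCol c i := by
          unfold pvStepCol
          rw [if_neg (by rintro ⟨_, h3⟩; omega), if_neg (by rintro ⟨_, h3⟩; exact h2 h3),
            if_pos ⟨hx, h2⟩]
        rw [hstep, pv_fillColUp_eq_fillCol]
        apply pv_runA_fixed
        · rw [pv_length_fillCol]; omega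
        · intro k hk
          rw [pv_fillCol_getD, if_pos ⟨hk, by omega⟩]
        · rw [pv_fillCol_getD, if_neg (by omega), hx]; decide
    · rw [if_neg hx]
      have hstep : pvStepCol c i = c := by
        unfold pvStepCol
        rw [if_neg (by rintro ⟨h, -⟩; exact hx h), if_neg (by rintro ⟨h, -⟩; exact hx h),
          if_neg (by rintro ⟨h, -⟩; exact hx h)]
      rw [hstep, ih c (by omega)]
      congr 1
      simp [Nat.ne_of_lt (show i < c.length by omega)]

-- ===== VERDICT (by name: the statement is the Claim_ definition above) =====
theorem convert_position_matrix_spec : Claim_equal_convert_position_matrix := by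
  intro pm _hdom hpre
  unfold Spec_convert_position_matrix convert_position_matrix convert_position_matrix_alt
  cases pm with
  | nil => rfl
  | cons r rs =>
    set pm := r :: rs with hpm
    have hne : pm.isEmpty = false := rfl
    rw [hne]
    simp only [Bool.false_eq_true, if_false]
    have hr : pvRect pm (pm.getD 0 []).length := by
      intro k hk
      have hmem : pm.getD k [] ∈ pm := by
        rw [List.getD_eq_getElem _ _ hk]; exact List.getElem_mem hk
      have := hpre _ hmem
      simpa [hpm] using this
    obtain ⟨a1, a2⟩ := pv_rowsA_char pm.length pm (pm.getD 0 []).length rfl hr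
    obtain ⟨b1, b2⟩ := pv_altFold_char (pm.getD 0 []).length pm (pm.getD 0 []).length
      pm.length le_rfl hr rfl
    apply pv_mat_ext (a1.trans b1.symm)
    intro j
    rw [a2 j, b2 j]
    by_cases hj : j < (pm.getD 0 []).length
    · rw [if_pos hj, if_pos hj]
      have hlen : (pvColOf pm j).length = pm.length := pv_length_colOf pm j
      have := pv_col_main pm.length (pvColOf pm j) (by omega)
      rw [this]
      congr 1
      simp [hlen]
    · rw [if_neg hj, if_neg hj]
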